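-- pv_equiv track=rewrite | github.com/christophevg/c3 | skills/pyenv/scripts/skill_context.py | get_version_options
-- ===== SOURCE A (Python) =====
-- def get_version_options(installed_versions: list[str]) -> list[dict]:
--     """Get version options for user selection."""
--     # Categorize versions - filter out environment paths
--     latest = None
--     lts = None
--     compat = None
--     other = []
--
--     for v in installed_versions:
--         # Skip environment paths (e.g., "3.11.12/envs/incubator")
--         if "/envs/" in v:
--             continue
--         if not v.startswith("3."):
--             continue
--         parts = v.split(".")
--         if len(parts) >= 2:
--             major_minor = f"{parts[0]}.{parts[1]}"
--             if major_minor == "3.13":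
--                 latest = v
--             elif major_minor == "3.12":
--                 lts = v
--             elif major_minor == "3.10":
--                 compat = v
--             else:
--                 other.append(v)
--
--     options = []
--     if latest:
--         options.append({"value": latest, "label": f"{latest} (latest stable)"})
--     if lts:
--         options.append({"value": lts, "label": f"{lts} (LTS - recommended)"})
--     if compat:
--         options.append({"value": compat, "label": f"{compat} (maximum compatibility)"})
--     for v in other[:2]:  # Add up to 2 other versions
--         options.append({"value": v, "label": f"{v} (installed)"})
--     options.append({"value": "other", "label": "Other version..."})
--
--     return options
-- ===== SOURCE B (Python) =====
-- SPECIALS = [("3.13", "latest stable"),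
--             ("3.12", "LTS - recommended"),
--             ("3.10", "maximum compatibility")]
--
-- def _major_minor(v):
--     """major.minor key for an eligible bare version, else None."""
--     if "/envs/" in v or not v.startswith("3."):
--         return None
--     parts = v.split(".")
--     return parts[0] + "." + parts[1] if len(parts) >= 2 else None
--
-- def get_version_options(installed_versions):
--     """Get version options for user selection."""
--     pairs = [(mm, v) for v in installed_versions
--              if (mm := _major_minor(v)) is not None]
--     options = []
--     for key, suffix in SPECIALS:
--         # last-listed version of that series wins, found by a reversed scan
--         pick = next((v for mm, v in reversed(pairs) if mm == key), None)
--         if pick is not None: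
--             options.append({"value": pick, "label": f"{pick} ({suffix})"})
--     special_keys = {key for key, _ in SPECIALS}
--     others = [v for mm, v in pairs if mm not in special_keys][:2]
--     options += [{"value": v, "label": f"{v} (installed)"} for v in others]
--     options.append({"value": "other", "label": "Other version..."})
--     return options
-- ===== Notes on version B (the rewrite author's own statement) =====
-- stated objective: alternative
-- what changed: Replaces A's single stateful pass with three mutable category variables by staged passes: one filterMap builds the eligible (major.minor, version) pairs, each special category is then picked by a reversed first-match scan over those pairs (equivalent to A's last-wins overwrite), and the 'other' versions come from a separate filter pass.
import Mathlib
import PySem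

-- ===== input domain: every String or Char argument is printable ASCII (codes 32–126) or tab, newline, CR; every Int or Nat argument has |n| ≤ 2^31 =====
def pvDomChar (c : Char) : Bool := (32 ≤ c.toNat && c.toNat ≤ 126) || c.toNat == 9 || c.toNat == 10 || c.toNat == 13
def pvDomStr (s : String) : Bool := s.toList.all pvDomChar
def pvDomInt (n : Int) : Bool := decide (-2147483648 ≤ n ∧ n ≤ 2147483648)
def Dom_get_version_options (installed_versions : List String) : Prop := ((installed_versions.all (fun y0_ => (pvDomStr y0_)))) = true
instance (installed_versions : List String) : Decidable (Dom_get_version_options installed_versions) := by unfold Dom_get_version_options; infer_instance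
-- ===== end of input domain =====

-- B replaces A's single stateful pass (three mutable category slots, last write wins)
-- with staged passes: a filterMap of (major.minor, version) pairs, a reversed
-- first-match scan per special category, and a separate filter pass for 'other'.

-- ===== PORT A =====
-- Python truthiness of an Optional[str]: None and "" are falsy
def pyTruthyStr (o : Option String) : Bool :=
  match o with
  | none => false
  | some s => s != ""

def gvoStepA (st : Option String × Option String × Option String × List String)
    (v : String) : Option String × Option String × Option String × List String :=
  if PySem.Str.isIn "/envs/" v then st
  else if !(PySem.Str.startswith v "3.") then st
  else
    match (PySem.Str.split? v ".").getD [] with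
    | p0 :: p1 :: _ =>
      let mm := p0 ++ "." ++ p1
      if mm == "3.13" then (some v, st.2.1, st.2.2.1, st.2.2.2)
      else if mm == "3.12" then (st.1, some v, st.2.2.1, st.2.2.2)
      else if mm == "3.10" then (st.1, st.2.1, some v, st.2.2.2)
      else (st.1, st.2.1, st.2.2.1, st.2.2.2 ++ [v])
    | _ => st

def get_version_options (installed_versions : List String) : List (List (String × String)) :=
  let st := installed_versions.foldl gvoStepA (none, none, none, [])
  (if pyTruthyStr st.1 then
      [[("value", st.1.getD ""), ("label", st.1.getD "" ++ " (latest stable)")]] else [])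
  ++ (if pyTruthyStr st.2.1 then
      [[("value", st.2.1.getD ""), ("label", st.2.1.getD "" ++ " (LTS - recommended)")]] else [])
  ++ (if pyTruthyStr st.2.2.1 then
      [[("value", st.2.2.1.getD ""), ("label", st.2.2.1.getD "" ++ " (maximum compatibility)")]] else [])
  ++ (PySem.List.slice st.2.2.2 none (some 2)).map
      (fun v => [("value", v), ("label", v ++ " (installed)")])
  ++ [[("value", "other"), ("label", "Other version...")]]

-- ===== PORT B =====
def gvoSpecials : List (String × String) :=
  [("3.13", "latest stable"), ("3.12", "LTS - recommended"), ("3.10", "maximum compatibility")]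

-- B's _major_minor helper
def gvoMajorMinor (v : String) : Option String :=
  if PySem.Str.isIn "/envs/" v || !(PySem.Str.startswith v "3.") then none
  else
    match (PySem.Str.split? v ".").getD [] with
    | p0 :: p1 :: _ => some (p0 ++ "." ++ p1)
    | _ => none

def gvoIsSpecial (mm : String) : Bool :=
  mm == "3.13" || mm == "3.12" || mm == "3.10"

def get_version_options_alt (installed_versions : List String) : List (List (String × String)) :=
  let pairs := installed_versions.filterMap
      (fun v => (gvoMajorMinor v).map (fun mm => (mm, v)))
  let options := gvoSpecials.filterMap (fun ks =>
      (pairs.reverse.find? (fun p => p.1 == ks.1)).map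
        (fun p => [("value", p.2), ("label", p.2 ++ " (" ++ ks.2 ++ ")")]))
  let others := (pairs.filter (fun p => !(gvoIsSpecial p.1))).map (fun p => p.2)
  options
  ++ (PySem.List.slice others none (some 2)).map
      (fun v => [("value", v), ("label", v ++ " (installed)")])
  ++ [[("value", "other"), ("label", "Other version...")]]

-- ===== PRECONDITION & SPEC =====
def Spec_get_version_options (installed_versions : List String) (out : List (List (String × String))) : Prop := out = get_version_options_alt installed_versions
instance (installed_versions : List String) (out : List (List (String × String))) : Decidable (Spec_get_version_options installed_versions out) := by unfold Spec_get_version_options; infer_instance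

-- ===== CLAIM (what is proved, stated in full; the proofs are below) =====
def Claim_equal_get_version_options : Prop := ∀ (installed_versions : List String), Dom_get_version_options installed_versions → Spec_get_version_options installed_versions (get_version_options installed_versions)

-- ===== LEMMAS AND PROOFS =====

-- B's pairs list for an input
def gvoPairs (l : List String) : List (String × String) :=
  l.filterMap (fun v => (gvoMajorMinor v).map (fun mm => (mm, v)))

-- last pair for a key = first match of a reversed scan
def gvoLast (key : String) (P : List (String × String)) : Option String :=
  (P.reverse.find? (fun p => p.1 == key)).map (fun p => p.2)

def gvoOthers (P : List (String × String)) : List String :=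
  (P.filter (fun p => !(gvoIsSpecial p.1))).map (fun p => p.2)

-- A's step expressed through B's helper
lemma gvoStepA_eq (st : Option String × Option String × Option String × List String)
    (v : String) :
    gvoStepA st v =
      match gvoMajorMinor v with
      | none => st
      | some mm =>
        if mm == "3.13" then (some v, st.2.1, st.2.2.1, st.2.2.2)
        else if mm == "3.12" then (st.1, some v, st.2.2.1, st.2.2.2)
        else if mm == "3.10" then (st.1, st.2.1, some v, st.2.2.2)
        else (st.1, st.2.1, st.2.2.1, st.2.2.2 ++ [v]) := by
  unfold gvoStepA gvoMajorMinor
  cases he : PySem.Str.isIn "/envs/" v <;>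
    cases hs : PySem.Str.startswith v "3." <;>
      simp only [he, hs, Bool.false_or, Bool.true_or, Bool.not_true, Bool.not_false,
        if_true, if_false, Bool.false_eq_true] <;>
      cases (PySem.Str.split? v ".").getD [] with
      | nil => rfl
      | cons p0 t => cases t <;> rfl

lemma gvoLast_cons (key mm v : String) (P : List (String × String)) :
    gvoLast key ((mm, v) :: P) =
      (gvoLast key P).or (if mm == key then some v else none) := by
  unfold gvoLast
  rw [List.reverse_cons, List.find?_append]
  cases h : (P.reverse.find? (fun p => p.1 == key)) with
  | none => simp [List.find?]; split <;> simp_all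
  | some p => simp

-- characterisation of A's fold by B's staged quantities
lemma gvoFold_char (l : List String)
    (st : Option String × Option String × Option String × List String) :
    l.foldl gvoStepA st =
      ((gvoLast "3.13" (gvoPairs l)).or st.1,
       (gvoLast "3.12" (gvoPairs l)).or st.2.1,
       (gvoLast "3.10" (gvoPairs l)).or st.2.2.1,
       st.2.2.2 ++ gvoOthers (gvoPairs l)) := by
  induction l generalizing st with
  | nil => simp [gvoPairs, gvoLast, gvoOthers]
  | cons v t ih =>
    rw [List.foldl_cons, ih, gvoStepA_eq]
    cases h : gvoMajorMinor v with
    | none => simp [gvoPairs, h]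
    | some mm =>
      simp only [gvoPairs, List.filterMap_cons, h, Option.map_some]
      by_cases e13 : mm = "3.13"
      · subst e13
        simp [gvoLast_cons, gvoOthers, gvoIsSpecial]
      · by_cases e12 : mm = "3.12"
        · subst e12
          simp [gvoLast_cons, gvoOthers, gvoIsSpecial]
        · by_cases e10 : mm = "3.10"
          · subst e10
            simp [gvoLast_cons, gvoOthers, gvoIsSpecial]
          · simp [gvoLast_cons, gvoOthers, gvoIsSpecial, e13, e12, e10]

-- every version in pairs is nonempty (it starts with "3.")
lemma gvoPairs_snd_ne (l : List String) (p : String × String)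
    (h : p ∈ gvoPairs l) : p.2 ≠ "" := by
  unfold gvoPairs at h
  obtain ⟨v, _, hv⟩ := List.mem_filterMap.mp h
  cases hmm : gvoMajorMinor v with
  | none => rw [hmm] at hv; simp at hv
  | some mm =>
    rw [hmm] at hv
    simp only [Option.map_some, Option.some.injEq] at hv
    subst hv
    intro hve
    simp only at hve
    subst hve
    unfold gvoMajorMinor at hmm
    simp at hmm
    exact absurd hmm.1.2 (by decide)

lemma gvoLast_ne (key : String) (l : List String) (s : String)
    (h : gvoLast key (gvoPairs l) = some s) : s ≠ "" := by
  unfold gvoLast at h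
  cases hf : (gvoPairs l).reverse.find? (fun p => p.1 == key) with
  | none => simp [hf] at h
  | some p =>
    simp [hf] at h
    subst h
    exact gvoPairs_snd_ne l p (List.mem_reverse.mp (List.mem_of_find?_eq_some hf))

lemma gvoFind_map_entry (key suffix : String) (P : List (String × String)) :
    (P.reverse.find? (fun p => p.1 == key)).map
      (fun p => [("value", p.2), ("label", p.2 ++ " (" ++ suffix ++ ")")])
    = (gvoLast key P).map (fun s => [("value", s), ("label", s ++ " (" ++ suffix ++ ")")]) := by
  unfold gvoLast
  cases P.reverse.find? (fun p => p.1 == key) <;> rfl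

-- ===== VERDICT (by name: the statement is the Claim_ definition above) =====
theorem get_version_options_spec : Claim_equal_get_version_options := by
  intro l _
  unfold Spec_get_version_options get_version_options get_version_options_alt
  rw [gvoFold_char]
  rw [show List.filterMap (fun v => (gvoMajorMinor v).map (fun mm => (mm, v))) l
        = gvoPairs l from rfl]
  simp only [Option.or_none, List.nil_append, gvoSpecials, List.filterMap_cons,
    List.filterMap_nil, gvoFind_map_entry]
  rw [show ((gvoPairs l).filter (fun p => !(gvoIsSpecial p.1))).map (fun p => p.2)
        = gvoOthers (gvoPairs l) from rfl]
  have n13 := gvoLast_ne "3.13" l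
  have n12 := gvoLast_ne "3.12" l
  have n10 := gvoLast_ne "3.10" l
  cases h13 : gvoLast "3.13" (gvoPairs l) <;>
    cases h12 : gvoLast "3.12" (gvoPairs l) <;>
      cases h10 : gvoLast "3.10" (gvoPairs l) <;>
        simp_all [pyTruthyStr, String.append_assoc]
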